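-- pv_equiv track=rewrite | github.com/michabirklbauer/PIA | PIAScript.py | file_parser
-- ===== SOURCE A (Python) =====
-- def file_parser(list_of_files):
--
--     """
--     -- DESCRIPTION --
--     Parse a list of filenames for the file extensions. Return needed file types
--     as dictionary.
--     """
--
--     # file types processed by PIAScript
--     pdb = None
--     sdf1 = None
--     sdf2 = None
--     txt = None
--     piam = None
--
--     # extract file extensions
--     for f in list_of_files:
--         if f.split(".")[-1] == "pdb":
--             if pdb == None:
--                 pdb = f
--                 continue
--             else:
--                 continue
--         elif f.split(".")[-1] == "sdf":
--             if sdf1 == None: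
--                 sdf1 = f
--                 continue
--             elif sdf2 == None:
--                 sdf2 = f
--                 continue
--             else:
--                 continue
--         elif f.split(".")[-1] == "piam":
--             if piam == None:
--                 piam = f
--                 continue
--             else:
--                 continue
--         else:
--             if txt == None:
--                 txt = f
--                 continue
--             else:
--                 continue
--
--     return {"pdb": pdb, "sdf1": sdf1, "sdf2": sdf2, "txt": txt, "piam": piam}
-- ===== SOURCE B (Python) =====
-- def file_parser(list_of_files):
--     # one pass: bucket filenames by extension, then pick the first (and for sdf, second) of each bucket
--     buckets = {"pdb": [], "sdf": [], "piam": [], "txt": []}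
--     for f in list_of_files:
--         ext = f.split(".")[-1]
--         buckets[ext if ext in ("pdb", "sdf", "piam") else "txt"].append(f)
--
--     def nth(key, i):
--         lst = buckets[key]
--         return lst[i] if len(lst) > i else None
--
--     return {"pdb": nth("pdb", 0),
--             "sdf1": nth("sdf", 0),
--             "sdf2": nth("sdf", 1),
--             "txt": nth("txt", 0),
--             "piam": nth("piam", 0)}
-- ===== Notes on version B (the rewrite author's own statement) =====
-- stated objective: simpler
-- what changed: Replaces the five-variable if/elif state machine with a single classification pass into extension buckets followed by selecting the first (and second sdf) element of each bucket.
import Mathlib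
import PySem

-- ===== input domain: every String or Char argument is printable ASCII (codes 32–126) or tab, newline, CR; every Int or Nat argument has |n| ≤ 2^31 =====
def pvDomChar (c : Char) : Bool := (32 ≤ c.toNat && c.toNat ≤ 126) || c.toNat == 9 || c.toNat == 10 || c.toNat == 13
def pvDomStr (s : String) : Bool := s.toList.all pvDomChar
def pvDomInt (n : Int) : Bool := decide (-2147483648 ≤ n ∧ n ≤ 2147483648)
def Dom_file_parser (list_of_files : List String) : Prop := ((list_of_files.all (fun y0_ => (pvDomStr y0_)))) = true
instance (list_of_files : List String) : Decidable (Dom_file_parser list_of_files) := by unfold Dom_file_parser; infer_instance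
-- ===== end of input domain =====

-- B replaces A's five-variable if/elif state machine by bucketing files per extension and selecting firsts; objective: simpler.

-- ===== PORT A =====
-- f.split(".")[-1]  (shared extension helper)
def pyExt (f : String) : Option String :=
  PySem.List.pyGet? ((PySem.Str.split? f ".").getD []) (-1)

-- A's loop body: updates the five optional slots in A's branch order
def fpStepA (st : Option String × Option String × Option String × Option String × Option String)
    (f : String) : Option String × Option String × Option String × Option String × Option String :=
  let (pdb, sdf1, sdf2, txt, piam) := st
  if pyExt f = some "pdb" then
    (if pdb = none then (some f, sdf1, sdf2, txt, piam) else st)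
  else if pyExt f = some "sdf" then
    (if sdf1 = none then (pdb, some f, sdf2, txt, piam)
     else if sdf2 = none then (pdb, sdf1, some f, txt, piam) else st)
  else if pyExt f = some "piam" then
    (if piam = none then (pdb, sdf1, sdf2, txt, some f) else st)
  else
    (if txt = none then (pdb, sdf1, sdf2, some f, piam) else st)

def file_parser (list_of_files : List String) : List (String × Option String) :=
  let st := list_of_files.foldl fpStepA (none, none, none, none, none)
  [("pdb", st.1), ("sdf1", st.2.1), ("sdf2", st.2.2.1), ("txt", st.2.2.2.1), ("piam", st.2.2.2.2)]

-- ===== PORT B =====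
-- B's loop body: append f to the bucket of its extension (pdb, sdf, piam, txt = catch-all)
def fpStepB (bk : List String × List String × List String × List String)
    (f : String) : List String × List String × List String × List String :=
  let (bp, bs, bm, bt) := bk
  if pyExt f = some "pdb" then (bp ++ [f], bs, bm, bt)
  else if pyExt f = some "sdf" then (bp, bs ++ [f], bm, bt)
  else if pyExt f = some "piam" then (bp, bs, bm ++ [f], bt)
  else (bp, bs, bm, bt ++ [f])

def file_parser_alt (list_of_files : List String) : List (String × Option String) :=
  let bk := list_of_files.foldl fpStepB ([], [], [], [])
  [("pdb", bk.1[0]?), ("sdf1", bk.2.1[0]?), ("sdf2", bk.2.1[1]?), ("txt", bk.2.2.2[0]?), ("piam", bk.2.2.1[0]?)]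

-- ===== PRECONDITION & SPEC =====
def Spec_file_parser (list_of_files : List String) (out : List (String × Option String)) : Prop := out = file_parser_alt list_of_files
instance (list_of_files : List String) (out : List (String × Option String)) : Decidable (Spec_file_parser list_of_files out) := by unfold Spec_file_parser; infer_instance

-- ===== CLAIM (what is proved, stated in full; the proofs are below) =====
def Claim_equal_file_parser : Prop := ∀ (list_of_files : List String), Dom_file_parser list_of_files → Spec_file_parser list_of_files (file_parser list_of_files)

-- ===== LEMMAS AND PROOFS =====

-- the selection B performs on a bucket state
def fpSel (bk : List String × List String × List String × List String) :
    Option String × Option String × Option String × Option String × Option String :=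
  (bk.1[0]?, bk.2.1[0]?, bk.2.1[1]?, bk.2.2.2[0]?, bk.2.2.1[0]?)

set_option maxHeartbeats 1000000 in
theorem fpStep_comm (bk : List String × List String × List String × List String) (f : String) :
    fpStepA (fpSel bk) f = fpSel (fpStepB bk f) := by
  obtain ⟨bp, bs, bm, bt⟩ := bk
  rcases bp with _ | ⟨a, tp⟩ <;> rcases bs with _ | ⟨b, _ | ⟨c, ts⟩⟩ <;>
    rcases bm with _ | ⟨d, tm⟩ <;> rcases bt with _ | ⟨e, tu⟩ <;>
    simp only [fpStepA, fpStepB, fpSel] <;> split_ifs <;> simp_all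

theorem fpFold_comm (l : List String) (bk : List String × List String × List String × List String) :
    l.foldl fpStepA (fpSel bk) = fpSel (l.foldl fpStepB bk) := by
  induction l generalizing bk with
  | nil => rfl
  | cons f t ih => simp only [List.foldl_cons, fpStep_comm, ih]

-- ===== VERDICT (by name: the statement is the Claim_ definition above) =====
theorem file_parser_spec : Claim_equal_file_parser := by
  intro l _
  unfold Spec_file_parser file_parser file_parser_alt
  have h := fpFold_comm l ([], [], [], [])
  simp only [fpSel, List.getElem?_nil] at h
  simp [h]
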